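-- pv_equiv track=rewrite | github.com/dghohens/challenges | 06/pypi200k.py | package_number_history
-- ===== SOURCE A (Python) =====
-- from collections import Counter, OrderedDict
--
-- def package_number_history(date_list):
--     total_packages = 0
--     historical_counts = {}
--     date_counts = dict(Counter(date_list))
--     ordered_date_counts = OrderedDict(sorted(date_counts.items()))
--     for i,j in ordered_date_counts.items():
--         total_packages += j
--         historical_counts[i] = total_packages
--
--     return historical_counts
-- ===== SOURCE B (Python) =====
-- def package_number_history(date_list):
--     # Sort the full list once; in sorted order the (index+1) at the LAST
--     # occurrence of a date is exactly the cumulative package count, so a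
--     # single overwrite-as-you-go pass builds the dict: first insertion of
--     # each date fixes its (ascending) position, later overwrites bump the
--     # value up to the cumulative total.
--     historical_counts = {}
--     for i, date in enumerate(sorted(date_list)):
--         historical_counts[date] = i + 1
--     return historical_counts
-- ===== Notes on version B (the rewrite author's own statement) =====
-- stated objective: simpler
-- what changed: B drops the Counter/dict-of-counts/OrderedDict pipeline entirely: it sorts the raw date list once and makes a single enumerate pass, overwriting historical_counts[date] = index+1, so the last occurrence of each date leaves exactly the cumulative count in ascending key order.
import Mathlib
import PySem

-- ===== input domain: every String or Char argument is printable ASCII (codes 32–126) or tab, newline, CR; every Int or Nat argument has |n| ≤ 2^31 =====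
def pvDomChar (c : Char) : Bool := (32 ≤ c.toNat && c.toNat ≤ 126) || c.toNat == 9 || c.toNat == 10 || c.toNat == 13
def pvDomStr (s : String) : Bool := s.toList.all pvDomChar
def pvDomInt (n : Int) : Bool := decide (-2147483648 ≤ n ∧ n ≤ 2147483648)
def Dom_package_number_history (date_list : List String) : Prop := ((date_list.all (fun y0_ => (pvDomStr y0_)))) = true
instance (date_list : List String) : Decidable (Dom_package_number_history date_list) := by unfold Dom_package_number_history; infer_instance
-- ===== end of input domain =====

-- B replaces A's Counter → dict → OrderedDict(sorted items) → cumulative loop by a single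
-- overwrite pass over the sorted raw list (historical_counts[date] = index+1): simpler decomposition.

-- ===== PORT A =====
def package_number_history (date_list : List String) : List (String × Int) :=
  -- total_packages = 0; historical_counts = {}
  -- date_counts = dict(Counter(date_list))
  let date_counts : PySem.Dict String Int := PySem.Dict.counter date_list
  -- ordered_date_counts = OrderedDict(sorted(date_counts.items()))  (tuple sort: key then count)
  let ordered := PySem.List.sorted2 date_counts.items (fun p => p.1) (fun p => p.2) false
  -- for i,j in …: total_packages += j; historical_counts[i] = total_packages
  let st := ordered.foldl
    (fun (st : Int × PySem.Dict String Int) p =>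
      (st.1 + p.2, st.2.insert p.1 (st.1 + p.2)))
    (0, PySem.Dict.empty)
  st.2.items

-- ===== PORT B =====
def package_number_history_alt (date_list : List String) : List (String × Int) :=
  -- for i, date in enumerate(sorted(date_list)): historical_counts[date] = i + 1
  ((PySem.List.enumerate (PySem.List.sorted date_list (fun x => x) false) 0).foldl
      (fun (d : PySem.Dict String Int) p => d.insert p.2 (p.1 + 1))
      PySem.Dict.empty).items

-- ===== PRECONDITION & SPEC =====
def Spec_package_number_history (date_list : List String) (out : List (String × Int)) : Prop := out = package_number_history_alt date_list
instance (date_list : List String) (out : List (String × Int)) : Decidable (Spec_package_number_history date_list out) := by unfold Spec_package_number_history; infer_instance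

-- ===== CLAIM (what is proved, stated in full; the proofs are below) =====
def Claim_equal_package_number_history : Prop := ∀ (date_list : List String), Dom_package_number_history date_list → Spec_package_number_history date_list (package_number_history date_list)

-- ===== LEMMAS AND PROOFS =====

-- cumulative totals over a (key, run-count) list: the shape of A's final loop
def runsFold : Int → List (String × Int) → List (String × Int)
  | _, [] => []
  | t, (k, c) :: ps => (k, t + c) :: runsFold (t + c) ps

-- B's pass over a sorted list, tracking the current key and running index
def runsB : Int → String → List String → List (String × Int)
  | t, k, [] => [(k, t)]
  | t, k, x :: xs => if x = k then runsB (t + 1) k xs else (k, t) :: runsB (t + 1) x xs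

-- insertBy only looks at 'before' on the inserted element vs list elements
theorem insertBy_congr_mem {α : Type} (b1 b2 : α → α → Bool) (x : α) (ys : List α)
    (h : ∀ y ∈ ys, b1 x y = b2 x y) :
    PySem.List.insertBy b1 x ys = PySem.List.insertBy b2 x ys := by
  induction ys with
  | nil => rfl
  | cons y ys ih =>
    simp only [PySem.List.insertBy]
    rw [h y (by simp)]
    by_cases hb : b2 x y = true
    · simp [hb]
    · simp only [Bool.not_eq_true] at hb
      simp [hb, ih (fun z hz => h z (by simp [hz]))]

theorem foldl_insertBy_congr {α : Type} (b1 b2 : α → α → Bool) (s : List α)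
    (hb : ∀ a ∈ s, ∀ b ∈ s, b1 a b = b2 a b) :
    s.foldl (fun acc x => PySem.List.insertBy b1 x acc) [] =
      s.foldl (fun acc x => PySem.List.insertBy b2 x acc) [] := by
  suffices H : ∀ (xs acc : List α), (∀ a ∈ xs, a ∈ s) → (∀ a ∈ acc, a ∈ s) →
      xs.foldl (fun acc x => PySem.List.insertBy b1 x acc) acc =
        xs.foldl (fun acc x => PySem.List.insertBy b2 x acc) acc by
    exact H s [] (fun a ha => ha) (by simp)
  intro xs
  induction xs with
  | nil => intro acc _ _; rfl
  | cons x xs ih =>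
    intro acc hxs hacc
    simp only [List.foldl_cons]
    rw [insertBy_congr_mem b1 b2 x acc (fun y hy => hb x (hxs x (by simp)) y (hacc y hy))]
    exact ih _ (fun a ha => hxs a (by simp [ha]))
      (fun a ha => by
        rcases (PySem.List.mem_insertBy _ x a acc).1 ha with rfl | ha
        · exact hxs a (by simp)
        · exact hacc a ha)

-- sorted2 with pairwise-distinct first components is sorted by the first component
theorem sorted2_fst_eq {xs ys : List (String × Int)}
    (hperm : ys.Perm xs) (hpw : ys.Pairwise (fun a b => a.1 < b.1)) :
    PySem.List.sorted2 xs (fun p => p.1) (fun p => p.2) false = ys := by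
  have hnodup : (xs.map Prod.fst).Nodup := by
    have h1 : (ys.map Prod.fst).Pairwise (· < ·) := List.pairwise_map.2 hpw
    have h2 : (ys.map Prod.fst).Nodup := h1.imp (fun h => ne_of_lt h)
    exact ((hperm.map Prod.fst).nodup_iff).1 h2
  have hinj := List.inj_on_of_nodup_map hnodup
  have hs2 : PySem.List.sorted2 xs (fun p => p.1) (fun p => p.2) false
      = PySem.List.sorted xs (fun p => p.1) false := by
    simp only [PySem.List.sorted2, PySem.List.sorted, if_neg (by decide : ¬ (false = true))]
    apply foldl_insertBy_congr
    intro a ha b hb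
    by_cases hab : a.1 = b.1
    · have : a = b := hinj ha hb hab
      subst this
      simp
    · rcases lt_or_gt_of_ne hab with h | h
      · simp [h, not_lt_of_gt h]
      · simp [h, not_lt_of_gt h]
  rw [hs2]
  exact PySem.List.sorted_eq_of_perm_of_pairwise_lt xs ys (fun p => p.1) hperm hpw

-- A's cumulative loop over fresh, distinct keys appends runsFold
theorem foldA_items (ps : List (String × Int)) :
    ∀ (t : Int) (d : PySem.Dict String Int),
    (∀ p ∈ ps, d.contains p.1 = false) → (ps.map Prod.fst).Nodup →
    (ps.foldl (fun (st : Int × PySem.Dict String Int) p =>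
        (st.1 + p.2, st.2.insert p.1 (st.1 + p.2))) (t, d)).2.items
      = d.items ++ runsFold t ps := by
  induction ps with
  | nil => intro t d _ _; simp [runsFold]
  | cons p ps ih =>
    intro t d hfresh hnodup
    obtain ⟨k, c⟩ := p
    simp only [List.foldl_cons, runsFold]
    rw [ih (t + c) _ ?_ (by simpa using hnodup.of_cons),
      PySem.Dict.items_insert_of_not_contains d (t + c)
        (show d.contains k = false from hfresh (k, c) (by simp)),
      List.append_assoc, List.singleton_append]
    intro q hq
    rw [PySem.Dict.contains_insert]
    have hne : q.1 ≠ k := by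
      simp only [List.map_cons, List.nodup_cons] at hnodup
      intro h
      exact hnodup.1 (h ▸ List.mem_map_of_mem hq)
    simp [hne, hfresh q (by simp [hq])]

-- B's insert loop over the tail of a sorted list, with items pre ++ [(k0, t)] so far
theorem foldB_items (s : List String) :
    ∀ (t : Int) (d : PySem.Dict String Int) (pre : List (String × Int)) (k0 : String),
    d.items = pre ++ [(k0, t)] → (∀ p ∈ pre, p.1 < k0) →
    (k0 :: s).Pairwise (· ≤ ·) →
    ((PySem.List.enumerate s t).foldl
        (fun (d : PySem.Dict String Int) p => d.insert p.2 (p.1 + 1)) d).items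
      = pre ++ runsB t k0 s := by
  induction s with
  | nil => intro t d pre k0 hitems _ _; simp [PySem.List.enumerate_nil, runsB, hitems]
  | cons x s ih =>
    intro t d pre k0 hitems hpre hsort
    rw [PySem.List.enumerate_cons]
    simp only [List.foldl_cons, runsB]
    have hkeys : d.keys = pre.map Prod.fst ++ [k0] := by
      have := congrArg (List.map Prod.fst) hitems
      simpa [PySem.Dict.keys] using this
    by_cases hx : x = k0
    · subst hx
      have hcont : d.contains x = true := by
        rw [PySem.Dict.contains_iff_mem_keys, hkeys]; simp
      have hstep : (d.insert x (t + 1)).items = pre ++ [(x, t + 1)] := by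
        rw [PySem.Dict.items_insert_of_contains d _ hcont, hitems]
        rw [List.map_append]
        congr 1
        · refine (List.map_congr_left ?_).trans (List.map_id _)
          intro p hp
          have : p.1 ≠ x := ne_of_lt (hpre p hp)
          simp [this]
        · simp
      rw [if_pos rfl]
      exact ih (t + 1) _ pre x hstep hpre
        (List.Pairwise.cons (fun y hy => (List.pairwise_cons.1 hsort).1 y (by simp [hy]))
          ((List.pairwise_cons.1 ((List.pairwise_cons.1 hsort).2)).2))
    · have hlt : k0 < x :=
        lt_of_le_of_ne ((List.pairwise_cons.1 hsort).1 x (by simp)) (Ne.symm hx)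
      have hcont : d.contains x = false := by
        have hmem : x ∉ d.keys := by
          rw [hkeys]
          simp only [List.mem_append, List.mem_singleton, List.mem_map]
          rintro (⟨p, hp, hpx⟩ | hk0)
          · exact lt_asymm hlt (hpx ▸ hpre p hp)
          · exact hx hk0
        simpa using (mt (PySem.Dict.contains_iff_mem_keys d x).1 hmem)
      have hstep : (d.insert x (t + 1)).items = (pre ++ [(k0, t)]) ++ [(x, t + 1)] := by
        rw [PySem.Dict.items_insert_of_not_contains d _ hcont, hitems]
      rw [if_neg hx]
      have := ih (t + 1) _ (pre ++ [(k0, t)]) x hstep ?_ ((List.pairwise_cons.1 hsort).2)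
      · rw [this, List.append_assoc, List.singleton_append]
      · intro p hp
        rcases List.mem_append.1 hp with hp | hp
        · exact lt_trans (hpre p hp) hlt
        · simp only [List.mem_singleton] at hp
          subst hp
          exact hlt

-- PySem dedup (= Set.ofList) is a sublist of its input
theorem ofList_sublist {α : Type} [BEq α] [LawfulBEq α] (xs : List α) :
    (PySem.Set.ofList xs : List α).Sublist xs := by
  induction xs with
  | nil => simp [PySem.Set.ofList_nil]
  | cons x xs ih =>
    rw [PySem.Set.ofList_cons]
    exact List.Sublist.cons₂ x ((List.filter_sublist).trans ih)

-- the bridge: B's pass over a sorted list is A's cumulative fold over its dedup + counts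
theorem runsB_eq_runsFold (s : List String) :
    ∀ (x : String) (t : Int), (x :: s).Pairwise (· ≤ ·) →
    runsB t x s
      = runsFold (t - 1)
          ((PySem.Set.ofList (x :: s) : List String).map
            (fun k => (k, ((x :: s).count k : Int)))) := by
  induction s with
  | nil =>
    intro x t _
    simp [runsB, runsFold, PySem.Set.ofList_cons, PySem.Set.ofList_nil, PySem.Set.discard]
  | cons y s ih =>
    intro x t hsort
    obtain ⟨hx_le, htail⟩ := List.pairwise_cons.1 hsort
    by_cases hyx : y = x
    · subst hyx
      have hpair : (y :: s).Pairwise (· ≤ ·) :=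
        List.Pairwise.cons (fun z hz => hx_le z (by simp [hz])) (List.pairwise_cons.1 htail).2
      rw [show runsB t y (y :: s) = runsB (t + 1) y s from by simp [runsB]]
      rw [ih y (t + 1) hpair]
      have hof : PySem.Set.ofList (y :: y :: s) = PySem.Set.ofList (y :: s) := by
        simp [PySem.Set.ofList_cons, PySem.Set.discard, List.filter_filter]
      rw [hof, PySem.Set.ofList_cons]
      simp only [List.map_cons, runsFold]
      have hcnt : ∀ k ∈ (PySem.Set.ofList s).discard y,
          ((k, ((y :: s).count k : Int)) : String × Int) = (k, ((y :: y :: s).count k : Int)) := by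
        intro k hk
        have hky : y ≠ k := Ne.symm ((PySem.Set.mem_discard _ _ _).1 hk).2
        simp [List.count_cons_of_ne hky]
      have hc : (((y :: y :: s).count y : Nat) : Int) = (((y :: s).count y : Nat) : Int) + 1 := by
        rw [List.count_cons_self (a := y) (l := y :: s)]
        push_cast
        ring
      rw [hc, show t - 1 + ((((y :: s).count y : Nat) : Int) + 1)
          = t + (((y :: s).count y : Nat) : Int) from by omega]
      rw [List.map_congr_left (fun k hk => hcnt k hk),
        show t + 1 - 1 = t from by omega]
    · have hlt : x < y := lt_of_le_of_ne (hx_le y (by simp)) (Ne.symm hyx)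
      have hxnot : x ∉ (y :: s) := by
        intro hmem
        rcases List.mem_cons.1 hmem with h | h
        · exact hyx h.symm
        · exact lt_irrefl x (lt_of_lt_of_le hlt ((List.pairwise_cons.1 htail).1 x h))
      rw [show runsB t x (y :: s) = (x, t) :: runsB (t + 1) y s from by simp [runsB, hyx]]
      rw [ih y (t + 1) htail]
      have hof : PySem.Set.ofList (x :: y :: s) = x :: (PySem.Set.ofList (y :: s) : List String) := by
        rw [PySem.Set.ofList_cons]
        congr 1
        apply List.filter_eq_self.2
        intro k hk
        have : k ≠ x := fun h => hxnot (h ▸ (PySem.Set.mem_ofList _ _).1 hk)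
        simp [this]
      rw [hof]
      simp only [List.map_cons, runsFold]
      have hcx : (x :: y :: s).count x = 1 := by
        rw [List.count_cons_self, List.count_eq_zero_of_not_mem hxnot]
      rw [hcx, Nat.cast_one, show t - 1 + (1 : Int) = t from by omega]
      have hcnt : ∀ k ∈ (PySem.Set.ofList (y :: s) : List String),
          ((k, ((y :: s).count k : Int)) : String × Int) = (k, ((x :: y :: s).count k : Int)) := by
        intro k hk
        have hky : k ≠ x := fun h => hxnot (h ▸ (PySem.Set.mem_ofList _ _).1 hk)
        rw [List.count_cons_of_ne (Ne.symm hky)]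
      rw [List.map_congr_left hcnt, show t + 1 - 1 = t from by omega]

theorem B_eq (date_list : List String) :
    package_number_history_alt date_list
      = runsFold 0 ((PySem.Set.ofList (PySem.List.sorted date_list (fun x => x) false) : List String).map
          (fun k => (k, ((PySem.List.sorted date_list (fun x => x) false).count k : Int)))) := by
  unfold package_number_history_alt
  have hpw : (PySem.List.sorted date_list (fun x => x) false).Pairwise (· ≤ ·) :=
    PySem.List.sorted_pairwise date_list (fun x => x)
  rcases hs : PySem.List.sorted date_list (fun x => x) false with _ | ⟨x, s'⟩
  · simp [PySem.List.enumerate_nil, runsFold, PySem.Set.ofList_nil, PySem.Dict.empty]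
  · rw [hs] at hpw
    rw [PySem.List.enumerate_cons, List.foldl_cons,
      show (((0 : Int), x).1 + 1) = (1 : Int) from by norm_num]
    have hstep : ((PySem.Dict.empty : PySem.Dict String Int).insert ((0 : Int), x).2 1).items
        = [] ++ [(x, 1)] := by
      rw [PySem.Dict.items_insert_of_not_contains _ _ (by simp [PySem.Dict.contains, PySem.Dict.empty])]
      rfl
    rw [foldB_items s' 1 _ [] x hstep (by simp) hpw, List.nil_append,
      runsB_eq_runsFold s' x 1 hpw]
    norm_num

theorem A_eq (date_list : List String) :
    package_number_history date_list
      = runsFold 0 ((PySem.Set.ofList (PySem.List.sorted date_list (fun x => x) false) : List String).map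
          (fun k => (k, ((PySem.List.sorted date_list (fun x => x) false).count k : Int)))) := by
  rw [show package_number_history date_list
      = ((PySem.List.sorted2 (PySem.Dict.counter date_list).items
            (fun p => p.1) (fun p => p.2) false).foldl
          (fun (st : Int × PySem.Dict String Int) p =>
            (st.1 + p.2, st.2.insert p.1 (st.1 + p.2)))
          (0, PySem.Dict.empty)).2.items from rfl]
  have hS : PySem.List.sorted (PySem.Set.ofList date_list : List String) (fun x => x) false
      = (PySem.Set.ofList (PySem.List.sorted date_list (fun x => x) false) : List String) := by
    apply PySem.List.sorted_eq_of_perm_of_pairwise_lt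
    · refine (List.perm_ext_iff_of_nodup (PySem.Set.nodup_ofList _) (PySem.Set.nodup_ofList _)).2 ?_
      intro a
      rw [PySem.Set.mem_ofList, PySem.Set.mem_ofList,
        (PySem.List.sorted_perm date_list (fun x => x) false).mem_iff]
    · have hle : (PySem.Set.ofList (PySem.List.sorted date_list (fun x => x) false) : List String).Pairwise (· ≤ ·) :=
        List.Pairwise.sublist (ofList_sublist _) (PySem.List.sorted_pairwise date_list (fun x => x))
      have hne : (PySem.Set.ofList (PySem.List.sorted date_list (fun x => x) false) : List String).Pairwise (· ≠ ·) :=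
        PySem.Set.nodup_ofList _
      exact (hle.and hne).imp (fun h => lt_of_le_of_ne h.1 h.2)
  have hSpw : (PySem.Set.ofList (PySem.List.sorted date_list (fun x => x) false) : List String).Pairwise (· < ·) := by
    rw [← hS]
    exact PySem.List.sorted_ofList_pairwise_lt date_list
  have hcount : ∀ k, date_list.count k = (PySem.List.sorted date_list (fun x => x) false).count k :=
    fun k => ((PySem.List.sorted_perm date_list (fun x => x) false).count_eq k).symm
  have hsort2 : PySem.List.sorted2 (PySem.Dict.counter date_list).items (fun p => p.1) (fun p => p.2) false
      = (PySem.Set.ofList (PySem.List.sorted date_list (fun x => x) false) : List String).map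
          (fun k => (k, ((PySem.List.sorted date_list (fun x => x) false).count k : Int))) := by
    apply sorted2_fst_eq
    · rw [PySem.Dict.items_counter]
      have h1 : ((PySem.Set.ofList (PySem.List.sorted date_list (fun x => x) false) : List String)).Perm
          (PySem.Set.ofList date_list : List String) := by
        rw [← hS]
        exact PySem.List.sorted_perm _ _ _
      rw [List.map_congr_left (l := (PySem.Set.ofList date_list : List String))
        (g := fun k => ((k, ((PySem.List.sorted date_list (fun x => x) false).count k : Int)) : String × Int))
        (fun k _ => by rw [hcount k])]
      exact h1.map _
    · exact List.pairwise_map.2 (hSpw.imp (fun h => h))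
  rw [hsort2]
  rw [foldA_items _ 0 PySem.Dict.empty (fun p _ => by simp [PySem.Dict.contains, PySem.Dict.empty])
    ?_]
  · rfl
  · have : ((PySem.Set.ofList (PySem.List.sorted date_list (fun x => x) false) : List String).map
        (fun k => ((k, ((PySem.List.sorted date_list (fun x => x) false).count k : Int)) : String × Int))).map Prod.fst
        = (PySem.Set.ofList (PySem.List.sorted date_list (fun x => x) false) : List String) := by
      rw [List.map_map]
      exact List.map_id _
    rw [this]
    exact PySem.Set.nodup_ofList _

-- ===== VERDICT (by name: the statement is the Claim_ definition above) =====
theorem package_number_history_spec : Claim_equal_package_number_history := by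
  intro date_list _
  unfold Spec_package_number_history
  rw [A_eq, B_eq]
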